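-- pv_equiv track=rewrite | github.com/chernetsovamaria/new | unique_number.py | find_unique
-- ===== SOURCE A (Python) =====
-- def find_unique(num_list):
--     rem = 0
--     num_dict = {d: d % 2 for d in num_list}
--     for i in num_dict.values():
--         rem += i
--     if rem == 1:
--         for k, v in num_dict.items():
--             if v == 1:
--                 return k
--     elif rem > 1:
--         for k, v in num_dict.items():
--             if v == 0:
--                 return k
-- ===== SOURCE B (Python) =====
-- def find_unique(num_list):
--     seen = set()
--     odd_count = 0
--     first_odd = None
--     first_even = None
--     for x in num_list:
--         p = x % 2
--         if x not in seen:
--             seen.add(x)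
--             if p == 1:
--                 odd_count += 1
--                 if first_odd is None:
--                     first_odd = x
--             else:
--                 if first_even is None:
--                     first_even = x
--     if odd_count == 1:
--         return first_odd
--     elif odd_count > 1:
--         return first_even
--     return None
-- ===== Notes on version B (the rewrite author's own statement) =====
-- stated objective: simpler
-- what changed: Replaced A's build-a-parity-dict, sum-its-values, then rescan-the-dict-items approach with a single pass that maintains a seen set, an odd-unique counter and the first odd / first even candidates directly.
import Mathlib
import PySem

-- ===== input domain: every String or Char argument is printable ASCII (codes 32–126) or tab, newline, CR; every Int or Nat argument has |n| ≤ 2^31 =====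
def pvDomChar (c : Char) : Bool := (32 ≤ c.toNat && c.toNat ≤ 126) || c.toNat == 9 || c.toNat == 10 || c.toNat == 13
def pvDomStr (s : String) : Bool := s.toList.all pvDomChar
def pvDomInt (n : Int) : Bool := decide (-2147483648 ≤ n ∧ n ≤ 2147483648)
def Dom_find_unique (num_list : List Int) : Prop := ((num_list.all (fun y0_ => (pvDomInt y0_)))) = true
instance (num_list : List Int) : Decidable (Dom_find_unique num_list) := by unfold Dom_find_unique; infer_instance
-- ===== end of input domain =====

-- B replaces A's build-a-parity-dict / sum-its-values / rescan-items scheme with one pass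
-- maintaining a seen set, an odd-unique counter and first-odd/first-even candidates (objective: simpler).


-- ===== PORT A =====
-- num_dict = {d: d % 2 for d in num_list}; rem = sum of the dict's values; the two
-- early-return scans over items are List.find? (first pair with that parity value).
def find_unique (num_list : List Int) : Option Int :=
  let num_dict : PySem.Dict Int Int :=
    num_list.foldl (fun d x => d.insert x (PySem.Int.mod x 2)) PySem.Dict.empty
  let rem : Int := num_dict.values.foldl (fun r i => r + i) 0
  if rem = 1 then
    (num_dict.items.find? (fun kv => kv.2 == 1)).map (·.1)
  else if rem > 1 then
    (num_dict.items.find? (fun kv => kv.2 == 0)).map (·.1)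
  else none

-- ===== PORT B =====
-- the loop body of Source B, on the state (seen, odd_count, first_odd, first_even)
def fuStep (st : List Int × Int × Option Int × Option Int) (x : Int) :
    List Int × Int × Option Int × Option Int :=
  match st with
  | (seen, oc, fo, fe) =>
    let p := PySem.Int.mod x 2
    if PySem.Set.contains seen x then (seen, oc, fo, fe)
    else (PySem.Set.add seen x,
          if p = 1 then oc + 1 else oc,
          if p = 1 then (if fo = none then some x else fo) else fo,
          if p = 1 then fe else (if fe = none then some x else fe))

def find_unique_alt (num_list : List Int) : Option Int :=
  match num_list.foldl fuStep (PySem.Set.empty, 0, none, none) with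
  | (_, oc, fo, fe) => if oc = 1 then fo else if oc > 1 then fe else none

-- ===== PRECONDITION & SPEC =====
def Spec_find_unique (num_list : List Int) (out : Option Int) : Prop := out = find_unique_alt num_list
instance (num_list : List Int) (out : Option Int) : Decidable (Spec_find_unique num_list out) := by unfold Spec_find_unique; infer_instance

-- ===== CLAIM (what is proved, stated in full; the proofs are below) =====
def Claim_equal_find_unique : Prop := ∀ (num_list : List Int), Dom_find_unique num_list → Spec_find_unique num_list (find_unique num_list)

-- ===== LEMMAS AND PROOFS =====

-- the state B's loop maintains, expressed over the distinct elements seen so far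
def fuState (q : List Int) : List Int × Int × Option Int × Option Int :=
  (PySem.Set.ofList q,
   ((PySem.Set.ofList q).countP (fun x => PySem.Int.mod x 2 = 1) : Int),
   (PySem.Set.ofList q).find? (fun x => PySem.Int.mod x 2 = 1),
   (PySem.Set.ofList q).find? (fun x => PySem.Int.mod x 2 = 0))

theorem fuStep_state (q : List Int) (x : Int) : fuStep (fuState q) x = fuState (q ++ [x]) := by
  have hofl := PySem.Set.ofList_append_singleton (xs := q) (x := x)
  by_cases hx : x ∈ PySem.Set.ofList q
  · have hc : (PySem.Set.ofList q).contains x = true := (PySem.Set.contains_iff _ _).mpr hx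
    have hadd := PySem.Set.add_of_mem hx
    simp only [fuStep, fuState, hc, if_true, hofl, hadd]
  · have hc : (PySem.Set.ofList q).contains x = false := by
      rcases h : (PySem.Set.ofList q).contains x with _ | _
      · rfl
      · exact absurd ((PySem.Set.contains_iff _ _).mp h) hx
    have hadd := PySem.Set.add_of_not_mem hx
    simp only [fuStep, fuState, hc, Bool.false_eq_true, if_false, hofl, hadd,
      List.countP_append, List.find?_append]
    rcases PySem.Int.mod_two_eq x with h2 | h2 <;>
      simp only [h2, List.countP_singleton, List.find?_singleton, decide_eq_true_eq] <;>
      simp only [if_true, Nat.cast_add, Nat.cast_ite, Nat.cast_one,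
        Nat.cast_zero] <;>
      cases hf1 : List.find? (fun x => decide (PySem.Int.mod x 2 = 1)) (PySem.Set.ofList q) <;>
      cases hf0 : List.find? (fun x => decide (PySem.Int.mod x 2 = 0)) (PySem.Set.ofList q) <;>
      simp [Option.or]

theorem fuLoop_state (l q : List Int) : l.foldl fuStep (fuState q) = fuState (q ++ l) := by
  induction l generalizing q with
  | nil => simp
  | cons x xs ih =>
      rw [List.foldl_cons, fuStep_state, ih]
      congr 1
      simp

-- A's dict after the comprehension: distinct keys in first-occurrence order, parity values
theorem dictA_items (l : List Int) :
    (l.foldl (fun d x => d.insert x (PySem.Int.mod x 2)) PySem.Dict.empty).items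
      = (PySem.Set.ofList l).map (fun k => (k, PySem.Int.mod k 2)) := by
  induction l using List.reverseRecOn with
  | nil => rfl
  | append_singleton xs x ih =>
      rw [List.foldl_append, List.foldl_cons, List.foldl_nil, PySem.Set.ofList_append_singleton]
      set d := xs.foldl (fun d x => d.insert x (PySem.Int.mod x 2)) PySem.Dict.empty with hd
      have hkeys : d.keys = PySem.Set.ofList xs := by
        simp [PySem.Dict.keys, ih, List.map_map, Function.comp_def]
      by_cases hx : x ∈ PySem.Set.ofList xs
      · have hc : d.contains x = true := by
          rw [PySem.Dict.contains_iff_mem_keys, hkeys]; exact hx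
        rw [PySem.Dict.items_insert_of_contains _ _ hc, ih, PySem.Set.add_of_mem hx,
            List.map_map]
        apply List.map_congr_left
        intro k _
        by_cases hk : k = x <;> simp [Function.comp, hk]
      · have hc : d.contains x = false := by
          rcases h : d.contains x with _ | _
          · rfl
          · rw [PySem.Dict.contains_iff_mem_keys, hkeys] at h; exact absurd h hx
        rw [PySem.Dict.items_insert_of_not_contains _ _ hc, ih,
            PySem.Set.add_of_not_mem hx]
        simp

-- the sum of the parity values is the number of odd elements
theorem sum_parities (u : List Int) (a : Int) :
    (u.map (fun k => PySem.Int.mod k 2)).foldl (fun r i => r + i) a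
      = a + ((u.countP (fun x => PySem.Int.mod x 2 = 1) : Nat) : Int) := by
  induction u generalizing a with
  | nil => simp
  | cons y ys ih =>
      rcases PySem.Int.mod_two_eq y with h2 | h2 <;>
        simp only [List.map_cons, List.foldl_cons, ih, List.countP_cons, h2,
          decide_eq_true_eq] <;>
        (push_cast; omega)

theorem find_unique_spec : Claim_equal_find_unique := by
  intro num_list _
  unfold Spec_find_unique
  have hB : find_unique_alt num_list
      = (if ((PySem.Set.ofList num_list).countP (fun x => PySem.Int.mod x 2 = 1) : Int) = 1 then
           (PySem.Set.ofList num_list).find? (fun x => PySem.Int.mod x 2 = 1)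
         else if ((PySem.Set.ofList num_list).countP (fun x => PySem.Int.mod x 2 = 1) : Int) > 1 then
           (PySem.Set.ofList num_list).find? (fun x => PySem.Int.mod x 2 = 0)
         else none) := by
    have hloop := fuLoop_state num_list []
    rw [List.nil_append] at hloop
    unfold find_unique_alt
    rw [show (PySem.Set.empty, (0 : Int), (none : Option Int), (none : Option Int))
          = fuState [] from rfl, hloop]
    rfl
  rw [hB]
  simp only [find_unique]
  rw [dictA_items num_list]
  have hvalues :
      ((num_list.foldl (fun d x => d.insert x (PySem.Int.mod x 2)) PySem.Dict.empty).values)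
        = (PySem.Set.ofList num_list).map (fun k => PySem.Int.mod k 2) := by
    simp only [PySem.Dict.values, dictA_items num_list, List.map_map]
    rfl
  rw [hvalues, sum_parities, zero_add]
  have hfind1 : (((PySem.Set.ofList num_list).map (fun k => (k, PySem.Int.mod k 2))).find?
        (fun kv => kv.2 == 1)).map (·.1)
      = (PySem.Set.ofList num_list).find? (fun x => PySem.Int.mod x 2 = 1) := by
    rw [List.find?_map, Option.map_map]
    have hp : ((fun (kv : Int × Int) => kv.2 == 1) ∘ fun k => (k, PySem.Int.mod k 2))
        = (fun x => decide (PySem.Int.mod x 2 = 1)) := by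
      funext k; rw [Bool.eq_iff_iff]; simp
    rw [hp]
    cases hres : (PySem.Set.ofList num_list).find? (fun x => decide (PySem.Int.mod x 2 = 1)) <;>
      simp [Function.comp]
  have hfind0 : (((PySem.Set.ofList num_list).map (fun k => (k, PySem.Int.mod k 2))).find?
        (fun kv => kv.2 == 0)).map (·.1)
      = (PySem.Set.ofList num_list).find? (fun x => PySem.Int.mod x 2 = 0) := by
    rw [List.find?_map, Option.map_map]
    have hp : ((fun (kv : Int × Int) => kv.2 == 0) ∘ fun k => (k, PySem.Int.mod k 2))
        = (fun x => decide (PySem.Int.mod x 2 = 0)) := by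
      funext k; rw [Bool.eq_iff_iff]; simp
    rw [hp]
    cases hres : (PySem.Set.ofList num_list).find? (fun x => decide (PySem.Int.mod x 2 = 0)) <;>
      simp [Function.comp]
  rw [hfind1, hfind0]
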